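-- pv_equiv track=rewrite | github.com/Suleiman99Hesham/LeetCode_problems | Short_Encoding_of_Words.py | find
-- ===== SOURCE A (Python) =====
-- def find(input_str, search_str):
--     length = len(search_str)
--     index = 0
--     while index < length:
--         i = search_str.find(input_str, index)
--         if i == -1:
--             return -1
--         if search_str[i+len(input_str)] == '#':
--             return i
--         index = i + 1
--     return -1
-- ===== SOURCE B (Python) =====
-- def find(input_str, search_str):
--     n = len(input_str)
--     for i in range(len(search_str)):
--         if search_str[i:i+n] == input_str and search_str[i+n:i+n+1] == '#':
--             return i
--     return -1
-- ===== Notes on version B (the rewrite author's own statement) =====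
-- stated objective: simpler
-- what changed: Replaces the restarting str.find loop with its raw index into the delimiter position by a single left-to-right offset scan that compares slices, removing the find/restart bookkeeping.
-- crash fix: A raises IndexError exactly when input_str is nonempty, search_str ends with input_str and search_str contains no occurrence of input_str immediately followed by '#'; B returns -1 there. — e.g. on find("a", "ba"): A raises IndexError, B returns -1
import Mathlib
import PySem

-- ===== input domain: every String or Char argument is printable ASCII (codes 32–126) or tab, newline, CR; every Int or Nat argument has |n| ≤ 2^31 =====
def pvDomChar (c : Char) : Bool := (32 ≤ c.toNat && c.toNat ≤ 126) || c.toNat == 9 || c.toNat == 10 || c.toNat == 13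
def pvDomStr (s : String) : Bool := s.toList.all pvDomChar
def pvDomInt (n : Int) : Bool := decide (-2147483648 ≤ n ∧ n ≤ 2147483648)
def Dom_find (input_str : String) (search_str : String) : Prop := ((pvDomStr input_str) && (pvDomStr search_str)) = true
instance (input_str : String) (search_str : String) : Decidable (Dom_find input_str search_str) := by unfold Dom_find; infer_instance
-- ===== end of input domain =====

-- B replaces A's restarting str.find loop by one plain left-to-right offset scan with slice
-- comparisons (objective: simpler); equivalence is about the return value on Pre_find, which
-- excludes exactly the inputs where A raises IndexError (B returns -1 there, see Raises_find).

-- ===== PORT A =====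
-- termination helper for the while-loop port: the next loop index i+1 exceeds the current one
theorem findFrom_index_lt (s inp : List Char) (index : Nat)
    (hk : index ≤ s.length)
    (h : PySem.Chars.findFrom s inp (index : Int) none ≠ -1) :
    index < (PySem.Chars.findFrom s inp (index : Int) none).toNat + 1 := by
  have := (PySem.Chars.findFrom_natCast_spec s inp index hk h).1
  omega

def findGoA (inp s : List Char) (index : Nat) : Int :=
  if _h : index < s.length then
    let i := PySem.Chars.findFrom s inp (index : Int) none
    if h1 : i = -1 then -1
    else
      match PySem.List.pyGet? s (i + (inp.length : Int)) with
      | some c => if c = '#' then i else findGoA inp s (i.toNat + 1)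
      | none => -1    -- Python raises IndexError here; excluded by Pre_find
  else -1
termination_by s.length - index
decreasing_by
  have := findFrom_index_lt s inp index (by omega) h1
  omega

def find (input_str : String) (search_str : String) : Int :=
  findGoA input_str.toList search_str.toList 0

-- ===== PORT B =====
-- Source B: for i in range(len(search_str)): compare the slice search_str[i:i+n] with input_str and
-- the slice search_str[i+n:i+n+1] with '#'.  The slice search_str[i:i+n] is take n of the
-- remaining suffix (search_str[i:]), so the range-loop is the structural recursion on that suffix.
def findGoB (inp rest : List Char) (i : Nat) : Int :=
  match rest with
  | [] => -1
  | c :: tl =>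
    if ((c :: tl).take inp.length = inp ∧ (((c :: tl).drop inp.length).take 1 = ['#']))
    then (i : Int)
    else findGoB inp tl (i + 1)

def find_alt (input_str : String) (search_str : String) : Int :=
  findGoB input_str.toList search_str.toList 0

-- ===== PRECONDITION & SPEC =====
-- Pre_find excludes exactly the inputs on which A raises IndexError (nonempty input_str that is a
-- suffix of search_str while no occurrence of input_str followed by '#' exists in search_str).
def Pre_find (input_str : String) (search_str : String) : Prop :=
  input_str.toList = [] ∨ ¬ (input_str.toList <:+ search_str.toList) ∨
    (input_str.toList ++ ['#']) <:+: search_str.toList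
instance (input_str : String) (search_str : String) : Decidable (Pre_find input_str search_str) := by
  unfold Pre_find; infer_instance

def pvWitness_find : String × String := ("a", "a#b")

-- (checkable below as theorem find_raises) A raises IndexError exactly when input_str is nonempty, search_str ends with input_str and
-- search_str contains no occurrence of input_str immediately followed by '#'; B returns -1 there.
def Raises_find (input_str : String) (search_str : String) : Prop :=
  input_str.toList ≠ [] ∧ (input_str.toList <:+ search_str.toList) ∧
    ¬ (input_str.toList ++ ['#']) <:+: search_str.toList
instance (input_str : String) (search_str : String) : Decidable (Raises_find input_str search_str) := by
  unfold Raises_find; infer_instance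

def pvRaiseWitness_find : String × String := ("a", "ba")
def pvRaiseWitnessOut_find : Int := -1

def Spec_find (input_str : String) (search_str : String) (out : Int) : Prop := out = find_alt input_str search_str
instance (input_str : String) (search_str : String) (out : Int) : Decidable (Spec_find input_str search_str out) := by unfold Spec_find; infer_instance

-- ===== CLAIM (what is proved, stated in full; the proofs are below) =====
def Claim_equal_find : Prop := ∀ (input_str : String) (search_str : String), Dom_find input_str search_str → Pre_find input_str search_str → Spec_find input_str search_str (find input_str search_str)

def Claim_raises_find : Prop := (∀ (input_str : String) (search_str : String), Dom_find input_str search_str → Raises_find input_str search_str → ¬ Pre_find input_str search_str) ∧ (Dom_find (pvRaiseWitness_find.1) (pvRaiseWitness_find.2) ∧ Raises_find (pvRaiseWitness_find.1) (pvRaiseWitness_find.2) ∧ find_alt (pvRaiseWitness_find.1) (pvRaiseWitness_find.2) = pvRaiseWitnessOut_find)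

-- ===== LEMMAS AND PROOFS =====

theorem slice_test_iff (inp t : List Char) :
    (t.take inp.length = inp ∧ (t.drop inp.length).take 1 = ['#']) ↔ (inp ++ ['#']) <+: t := by
  constructor
  · rintro ⟨h1, h2⟩
    refine ⟨(t.drop inp.length).drop 1, ?_⟩
    rw [List.append_assoc]
    conv_rhs => rw [← List.take_append_drop inp.length t]
    rw [h1]
    congr 1
    rw [← h2, List.take_append_drop]
  · rintro ⟨t', ht⟩
    rw [List.append_assoc] at ht
    subst ht
    exact ⟨by simp, by simp⟩

theorem take_one_eq_iff (t : List Char) (c : Char) : t.take 1 = [c] ↔ t.head? = some c := by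
  cases t <;> simp

theorem P_iff (inp s : List Char) (j : Nat) :
    (inp ++ ['#']) <+: s.drop j ↔ (inp <+: s.drop j ∧ s[j + inp.length]? = some '#') := by
  rw [← slice_test_iff, List.drop_drop, take_one_eq_iff, List.head?_drop]
  constructor
  · rintro ⟨h1, h2⟩
    exact ⟨List.prefix_iff_eq_take.mpr h1.symm, by simpa [Nat.add_comm] using h2⟩
  · rintro ⟨h1, h2⟩
    exact ⟨(List.prefix_iff_eq_take.mp h1).symm, by simpa [Nat.add_comm] using h2⟩

-- the first occurrence of inp at or after index, when followed by '#', is the global first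
-- '#'-followed occurrence (given none exists before index)
theorem A_found (inp s : List Char) : ∀ (n index j : Nat),
    s.length - index = n →
    index ≤ s.length →
    (∀ j' < index, ¬ (inp ++ ['#']) <+: s.drop j') →
    (inp ++ ['#']) <+: s.drop j →
    (∀ j' < j, ¬ (inp ++ ['#']) <+: s.drop j') →
    findGoA inp s index = (j : Int) := by
  intro n
  induction n using Nat.strong_induction_on with
  | _ n ih =>
    intro index j hn hle hinv hP hmin
    -- index ≤ j since P j holds and inv excludes j < index
    have hij : index ≤ j := by
      by_contra h
      exact hinv j (by omega) hP
    -- j + inp.length < s.length from hP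
    have hjlen : j + inp.length < s.length := by
      obtain ⟨hlt, -⟩ := List.getElem?_eq_some_iff.mp ((P_iff inp s j).mp hP).2
      omega
    have hidx : index < s.length := by omega
    rw [findGoA]
    rw [dif_pos hidx]
    set r := PySem.Chars.findFrom s inp (index : Int) none with hr
    have hrne : r ≠ -1 := by
      intro hEq
      rw [hr, PySem.Chars.findFrom_natCast_eq_neg_one_iff s inp index (by omega)] at hEq
      apply hEq
      rw [← PySem.Chars.isIn_iff_infix, ← PySem.Chars.exists_prefix_drop_iff_isIn]
      refine ⟨j - index, ?_⟩
      rw [List.drop_drop, show index + (j - index) = j from by omega]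
      exact ((P_iff inp s j).mp hP).1
    rw [dif_neg hrne]
    obtain ⟨hr1, hr2, hr3⟩ := PySem.Chars.findFrom_natCast_spec s inp index (by omega) hrne
    -- r ≤ j : j is an occurrence ≥ index and r is the first
    have hrj : r.toNat ≤ j := by
      by_contra h
      exact hr3 j (by omega) (by omega) ((P_iff inp s j).mp hP).1
    have hrnn : (0:Int) ≤ r := le_trans (by positivity) hr1
    have hcast : r + (inp.length : Int) = ((r.toNat + inp.length : Nat) : Int) := by
      omega
    rw [hcast, PySem.List.pyGet?_natCast]
    by_cases hPr : (inp ++ ['#']) <+: s.drop r.toNat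
    · -- r is itself a '#'-occurrence, so r = j and A returns r
      have : r.toNat = j := by
        rcases Nat.lt_or_ge r.toNat j with h | h
        · exact absurd hPr (hmin _ h)
        · omega
      obtain ⟨_, h2⟩ := (P_iff inp s r.toNat).mp hPr
      rw [h2]
      show (if ('#':Char) = '#' then r else findGoA inp s (r.toNat + 1)) = (j : Int)
      rw [if_pos rfl]
      omega
    · -- not followed by '#': either out of range (impossible since r ≤ j and occurrences
      -- before j+len fit) or the char differs; recurse
      have hOccr := hr2
      rcases hg : s[r.toNat + inp.length]? with _ | c
      · -- none: r.toNat + inp.length ≥ s.length; but r ≤ j and j + len < len s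
        have := List.getElem?_eq_none_iff.mp hg
        omega
      · have hc : c ≠ '#' := by
          intro hc
          exact hPr ((P_iff inp s r.toNat).mpr ⟨hOccr, by rw [hg, hc]⟩)
        show (if c = '#' then r else findGoA inp s (r.toNat + 1)) = (j : Int)
        rw [if_neg hc]
        refine ih (s.length - (r.toNat + 1)) (by omega) (r.toNat + 1) j rfl (by omega) ?_ hP hmin
        intro j' hj'
        rcases Nat.lt_or_ge j' index with h | h
        · exact hinv j' h
        · rcases Nat.lt_or_ge j' r.toNat with h2 | h2
          · intro hcon
            exact hr3 j' (by omega) h2 ((P_iff inp s j').mp hcon).1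
          · have : j' = r.toNat := by omega
            rw [this]; exact hPr

theorem A_none (inp s : List Char) : ∀ (n index : Nat),
    s.length - index = n →
    index ≤ s.length →
    (∀ j, ¬ (inp ++ ['#']) <+: s.drop j) →
    findGoA inp s index = -1 := by
  intro n
  induction n using Nat.strong_induction_on with
  | _ n ih =>
    intro index hn hle hnone
    rw [findGoA]
    by_cases hidx : index < s.length
    · rw [dif_pos hidx]
      set r := PySem.Chars.findFrom s inp (index : Int) none with hr
      by_cases hrne : r = -1
      · rw [dif_pos hrne]
      · rw [dif_neg hrne]
        obtain ⟨hr1, hr2, _⟩ := PySem.Chars.findFrom_natCast_spec s inp index (by omega) hrne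
        have hrnn : (0:Int) ≤ r := le_trans (by positivity) hr1
        have hcast : r + (inp.length : Int) = ((r.toNat + inp.length : Nat) : Int) := by omega
        rw [hcast, PySem.List.pyGet?_natCast]
        -- occurrence at r: r.toNat + inp.length ≤ s.length
        rcases hg : s[r.toNat + inp.length]? with _ | c
        · -- Python raises IndexError here; the port (like B) yields -1, outside Pre_find
          rfl
        · have hc : c ≠ '#' := by
            intro hc
            exact hnone r.toNat ((P_iff inp s r.toNat).mpr ⟨hr2, by rw [hg, hc]⟩)
          obtain ⟨hlt, -⟩ := List.getElem?_eq_some_iff.mp hg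
          show (if c = '#' then r else findGoA inp s (r.toNat + 1)) = (-1 : Int)
          rw [if_neg hc]
          exact ih (s.length - (r.toNat + 1)) (by omega) (r.toNat + 1) rfl (by omega) hnone
    · rw [dif_neg hidx]


theorem B_found (inp : List Char) : ∀ (rest : List Char) (i j : Nat),
    (inp ++ ['#']) <+: rest.drop j →
    (∀ j' < j, ¬ (inp ++ ['#']) <+: rest.drop j') →
    findGoB inp rest i = ((i + j : Nat) : Int) := by
  intro rest
  induction rest with
  | nil =>
    intro i j hP _
    simp at hP
  | cons c tl ih =>
    intro i j hP hmin
    cases j with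
    | zero =>
      rw [findGoB, if_pos ((slice_test_iff inp (c :: tl)).mpr (by simpa using hP))]
      simp
    | succ j =>
      rw [findGoB, if_neg]
      · rw [ih (i + 1) j (by simpa using hP)
          (fun j' hj' => by simpa using hmin (j' + 1) (by omega))]
        congr 1
        omega
      · rw [slice_test_iff]
        simpa using hmin 0 (by omega)

theorem B_none (inp : List Char) : ∀ (rest : List Char) (i : Nat),
    (∀ j, ¬ (inp ++ ['#']) <+: rest.drop j) →
    findGoB inp rest i = -1 := by
  intro rest
  induction rest with
  | nil => intro i _; rfl
  | cons c tl ih =>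
    intro i h
    rw [findGoB, if_neg]
    · exact ih (i + 1) (fun j => by simpa using h (j + 1))
    · rw [slice_test_iff]
      simpa using h 0

-- ===== VERDICT (by name: the statement is the Claim_ definition above) =====
theorem find_spec : Claim_equal_find := by
  intro input_str search_str _hdom _hpre
  unfold Spec_find find find_alt
  set inp := input_str.toList
  set s := search_str.toList
  by_cases hex : ∃ j, (inp ++ ['#']) <+: s.drop j
  · have hmin := Nat.find_spec hex
    have hlt := fun j' (h : j' < Nat.find hex) => Nat.find_min hex h
    rw [A_found inp s (s.length - 0) 0 (Nat.find hex) rfl (by omega)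
          (by intro j' h; exact absurd h (Nat.not_lt_zero j')) hmin hlt,
        B_found inp s 0 (Nat.find hex) hmin hlt]
    simp
  · push Not at hex
    rw [A_none inp s (s.length - 0) 0 rfl (by omega) hex, B_none inp s 0 hex]

theorem find_raises : Claim_raises_find := by
  unfold Claim_raises_find
  constructor
  · intro input_str search_str _ hr hp
    rcases hr with ⟨h1, h2, h3⟩
    rcases hp with h | h | h
    · exact h1 h
    · exact h h2
    · exact h3 h
  · exact ⟨by decide, by decide, by decide⟩

-- self-check: the raise witness really lies inside Raises_find (projection of find_raises)
theorem find_raises_witness_ok : Raises_find (pvRaiseWitness_find.1) (pvRaiseWitness_find.2) :=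
  find_raises.2.2.1
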